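-- pv_equiv track=rewrite | github.com/REM-Infotech/CrawJUD-Legacy | bot/CrawJUD/__init__.py | group_keys
-- ===== SOURCE A (Python) =====
-- def group_keys(data: list[dict[str, str]]) -> dict[str, str]:
--
--     record = {}
--     for pos, entry in enumerate(data):
--         for key, value in entry.items():
--
--             if not record.get(key):
--                 record.update({key: {}})
--
--             record.get(key).update({str(pos): value})
--     return record
-- ===== SOURCE B (Python) =====
-- def group_keys(data):
--     keys = dict.fromkeys(k for entry in data for k in entry)
--     return {
--         k: {str(pos): entry[k] for pos, entry in enumerate(data) if k in entry}
--         for k in keys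
--     }
-- ===== Notes on version B (the rewrite author's own statement) =====
-- stated objective: alternative
-- what changed: B transposes the traversal: instead of A's single entry-by-entry pass mutating a dict of dicts, B first collects the ordered key set (dict.fromkeys over all entries) and then builds the result with a key-first dict comprehension, scanning positions per key.
import Mathlib
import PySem

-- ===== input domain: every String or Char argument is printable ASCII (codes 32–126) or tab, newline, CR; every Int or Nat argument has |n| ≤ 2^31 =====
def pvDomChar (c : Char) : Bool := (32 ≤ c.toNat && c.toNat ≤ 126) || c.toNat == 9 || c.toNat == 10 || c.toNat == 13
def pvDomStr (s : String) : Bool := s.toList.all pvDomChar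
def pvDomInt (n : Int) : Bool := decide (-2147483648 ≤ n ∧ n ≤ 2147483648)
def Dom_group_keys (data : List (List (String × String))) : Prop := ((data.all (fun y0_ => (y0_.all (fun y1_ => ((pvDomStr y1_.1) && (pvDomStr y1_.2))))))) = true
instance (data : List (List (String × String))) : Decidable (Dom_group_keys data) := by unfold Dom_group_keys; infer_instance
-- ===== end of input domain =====

-- B regroups by key with a key-first comprehension (ordered key set, then one scan of the positions per key)
-- instead of A's single entry-by-entry pass mutating a dict of dicts; alternative decomposition, not claimed faster.


-- ===== PORT A =====
def group_keys (data : List (List (String × String))) : List (String × List (String × String)) :=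
  let record : PySem.Dict String (PySem.Dict String String) :=
    (PySem.List.enumerate data).foldl
      (fun record pe =>
        pe.2.foldl
          (fun record kv =>
            let record :=
              -- 'if not record.get(key)': true when the key is absent (None) or its dict is empty (falsy)
              match record.get? kv.1 with
              | none => record.insert kv.1 PySem.Dict.empty
              | some d => if d.items = [] then record.insert kv.1 PySem.Dict.empty else record
            -- 'record.get(key).update({str(pos): value})' mutates the inner dict in place
            record.modify kv.1 PySem.Dict.empty (fun d => d.insert (PySem.Int.toStr pe.1) kv.2))
          record)
      PySem.Dict.empty
  record.items.map (fun p => (p.1, p.2.items))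

-- ===== PORT B =====
def group_keys_alt (data : List (List (String × String))) : List (String × List (String × String)) :=
  let keys := PySem.List.dedup (data.flatMap (fun entry => entry.map Prod.fst))   -- dict.fromkeys
  keys.map (fun k =>
    (k, (PySem.List.enumerate data).filterMap
          (fun pe => (List.lookup k pe.2).map (fun v => (PySem.Int.toStr pe.1, v)))))

-- ===== PRECONDITION & SPEC =====
-- Pre_ excludes association lists in which one entry carries a duplicate key: a Python dict can never
-- contain one, and on such raw lists the two ports' first-vs-last match conventions are both accidental.
def Pre_group_keys (data : List (List (String × String))) : Prop :=
  ∀ entry ∈ data, (entry.map Prod.fst).Nodup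
instance (data : List (List (String × String))) : Decidable (Pre_group_keys data) := by
  unfold Pre_group_keys; infer_instance

def pvWitness_group_keys : (List (List (String × String))) :=
  [[("a", "1"), ("b", "2")], [("a", "3")]]

def Spec_group_keys (data : List (List (String × String))) (out : List (String × List (String × String))) : Prop := out = group_keys_alt data
instance (data : List (List (String × String))) (out : List (String × List (String × String))) : Decidable (Spec_group_keys data out) := by unfold Spec_group_keys; infer_instance

-- ===== CLAIM (what is proved, stated in full; the proofs are below) =====
def Claim_equal_group_keys : Prop := ∀ (data : List (List (String × String))), Dom_group_keys data → Pre_group_keys data → Spec_group_keys data (group_keys data)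

-- ===== LEMMAS AND PROOFS =====

-- proof-side names for the pieces of the two programs
def entryStep (n : Int) (record : PySem.Dict String (PySem.Dict String String))
    (kv : String × String) : PySem.Dict String (PySem.Dict String String) :=
  let record :=
    match record.get? kv.1 with
    | none => record.insert kv.1 PySem.Dict.empty
    | some d => if d.items = [] then record.insert kv.1 PySem.Dict.empty else record
  record.modify kv.1 PySem.Dict.empty (fun d => d.insert (PySem.Int.toStr n) kv.2)

def keysOf (data : List (List (String × String))) : List String :=
  PySem.List.dedup (data.flatMap (fun entry => entry.map Prod.fst))

def innerOf (data : List (List (String × String))) (k : String) : List (String × String) :=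
  (PySem.List.enumerate data).filterMap
    (fun pe => (List.lookup k pe.2).map (fun v => (PySem.Int.toStr pe.1, v)))

lemma group_keys_unfold (data : List (List (String × String))) :
    group_keys data =
      ((PySem.List.enumerate data).foldl (fun r pe => pe.2.foldl (entryStep pe.1) r)
        PySem.Dict.empty).items.map (fun p => (p.1, p.2.items)) := rfl

lemma group_keys_alt_unfold (data : List (List (String × String))) :
    group_keys_alt data = (keysOf data).map (fun k => (k, innerOf data k)) := rfl

lemma digitChar_inj10 (a b : ℕ) (ha : a < 10) (hb : b < 10)
    (h : Nat.digitChar a = Nat.digitChar b) : a = b := by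
  interval_cases a <;> interval_cases b <;> simp_all [Nat.digitChar]

lemma toDigits10_inj : ∀ a b : ℕ, Nat.toDigits 10 a = Nat.toDigits 10 b → a = b := by
  intro a
  induction a using Nat.strong_induction_on with
  | _ a ih =>
    intro b h
    rw [Nat.toDigits_eq_if (n := a) (by norm_num), Nat.toDigits_eq_if (n := b) (by norm_num)] at h
    by_cases ha : a < 10 <;> by_cases hb : b < 10 <;>
      simp only [ha, hb, if_pos, if_false] at h
    · exact digitChar_inj10 a b ha hb (List.singleton_injective h)
    · have hp := Nat.length_toDigits_pos (b := 10) (n := b / 10)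
      have hlen := congrArg List.length h
      simp only [List.length_singleton, List.length_append] at hlen
      omega
    · have hp := Nat.length_toDigits_pos (b := 10) (n := a / 10)
      have hlen := congrArg List.length h
      simp only [List.length_singleton, List.length_append] at hlen
      omega
    · rw [← List.concat_eq_append, ← List.concat_eq_append, List.concat_inj] at h
      have h1 := ih (a / 10) (by omega) (b / 10) h.1
      have h2 := digitChar_inj10 (a % 10) (b % 10) (by omega) (by omega) h.2
      omega

lemma toStr_inj_nonneg (a b : Int) (ha : 0 ≤ a) (hb : 0 ≤ b)
    (h : PySem.Int.toStr a = PySem.Int.toStr b) : a = b := by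
  have h' := congrArg String.toList h
  simp only [PySem.Int.toList_toStr, PySem.Int.toChars, if_neg (by omega : ¬a < 0),
    if_neg (by omega : ¬b < 0)] at h'
  have := toDigits10_inj _ _ h'
  omega

lemma lookup_eq_none_of_not_mem {ν : Type} (l : List (String × ν)) (k : String)
    (h : k ∉ l.map Prod.fst) : List.lookup k l = none := by
  induction l with
  | nil => rfl
  | cons p rest ih =>
    simp only [List.map_cons, List.mem_cons, not_or] at h
    rw [List.lookup, beq_eq_false_iff_ne.mpr h.1]
    exact ih h.2

lemma lookup_ne_none_of_mem_fst {ν : Type} (l : List (String × ν)) (k : String)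
    (h : k ∈ l.map Prod.fst) : List.lookup k l ≠ none := by
  induction l with
  | nil => simp at h
  | cons p rest ih =>
    rw [List.lookup]
    by_cases hk : k = p.1
    · rw [beq_iff_eq.mpr hk]; simp
    · rw [beq_eq_false_iff_ne.mpr hk]
      simp only [List.map_cons, List.mem_cons] at h
      exact ih (h.resolve_left hk)

lemma get?_mk_map {ν : Type} (ks : List String) (f : String → ν) (k : String) :
    (PySem.Dict.mk (ks.map (fun k' => (k', f k')))).get? k =
      if k ∈ ks then some (f k) else none := by
  induction ks with
  | nil => simp [PySem.Dict.get?]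
  | cons k0 rest ih =>
    simp only [List.map_cons, PySem.Dict.get?_mk_cons, ih]
    by_cases hk : k0 = k
    · simp [hk]
    · simp [hk, Ne.symm hk]

lemma insert_mk_of_not_mem_fst {ν : Type} (l : List (String × ν)) (x : String) (v : ν)
    (h : x ∉ l.map Prod.fst) :
    (PySem.Dict.mk l).insert x v = PySem.Dict.mk (l ++ [(x, v)]) := by
  have hc : (PySem.Dict.mk l).contains x = false := by
    simp [PySem.Dict.contains]
    intro a b hab hax
    exact h (by simpa [hax] using List.mem_map_of_mem (f := Prod.fst) hab)
  apply PySem.Dict.ext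
  simp [PySem.Dict.items_insert_of_not_contains _ _ hc]

lemma insert_mk_map_of_mem {ν : Type} (ks : List String) (f : String → ν) (k : String) (v : ν)
    (hk : k ∈ ks) :
    (PySem.Dict.mk (ks.map (fun k' => (k', f k')))).insert k v =
      PySem.Dict.mk (ks.map (fun k' => (k', if k' = k then v else f k'))) := by
  have hc : (PySem.Dict.mk (ks.map (fun k' => (k', f k')))).contains k = true := by
    simp [hk]
  apply PySem.Dict.ext
  rw [PySem.Dict.items_insert_of_contains _ _ hc]
  simp only [List.map_map]
  refine List.map_congr_left ?_
  intro a _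
  by_cases ha : a = k <;> simp [ha]

lemma foldEntry (n : Int) :
    ∀ (e : List (String × String)) (ks : List String) (f : String → List (String × String)),
    ks.Nodup → (e.map Prod.fst).Nodup →
    (∀ k ∈ e.map Prod.fst, k ∈ ks →
        f k ≠ [] ∧ PySem.Int.toStr n ∉ (f k).map Prod.fst) →
    e.foldl (entryStep n) (PySem.Dict.mk (ks.map (fun k => (k, PySem.Dict.mk (f k))))) =
      PySem.Dict.mk
        ((ks ++ (e.map Prod.fst).filter (fun y => !(PySem.Set.contains ks y))).map
          (fun k => (k, PySem.Dict.mk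
            ((if k ∈ ks then f k else []) ++
              ((List.lookup k e).map (fun v => [(PySem.Int.toStr n, v)])).getD [])))) := by
  intro e
  induction e with
  | nil =>
    intro ks f hnd _ _
    simp only [List.foldl_nil, List.map_nil, List.filter_nil, List.append_nil, List.lookup_nil]
    congr 1
    refine List.map_congr_left ?_
    intro k hk
    simp [hk]
  | cons kv rest ih =>
    intro ks f hnd hde h3
    obtain ⟨k0, v0⟩ := kv
    simp only [List.map_cons, List.nodup_cons] at hde
    rw [List.foldl_cons]
    by_cases hmem : k0 ∈ ks
    · -- key already present, with a non-empty inner dict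
      have hstep : entryStep n (PySem.Dict.mk (ks.map (fun k => (k, PySem.Dict.mk (f k))))) (k0, v0)
          = PySem.Dict.mk (ks.map (fun k => (k, PySem.Dict.mk
              (if k = k0 then f k0 ++ [(PySem.Int.toStr n, v0)] else f k)))) := by
        obtain ⟨hne, hfresh⟩ := h3 k0 (List.mem_cons_self) hmem
        rw [entryStep]
        simp only [get?_mk_map, if_pos hmem, if_neg hne]
        rw [PySem.Dict.modify, PySem.Dict.getD_eq_get?_getD, get?_mk_map, if_pos hmem,
          Option.getD_some, insert_mk_of_not_mem_fst _ _ _ hfresh,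
          insert_mk_map_of_mem _ _ _ _ hmem]
        congr 1
        refine List.map_congr_left ?_
        intro k _
        by_cases hk : k = k0 <;> simp [hk]
      rw [hstep, ih ks _ hnd hde.2 ?cond]
      case cond =>
        intro k hk hks
        have hne : k ≠ k0 := fun h => hde.1 (h ▸ hk)
        simpa [if_neg hne] using h3 k (List.mem_cons_of_mem _ hk) hks
      have hfilter : (rest.map Prod.fst).filter (fun y => !(PySem.Set.contains ks y)) =
          ((k0 :: rest.map Prod.fst).filter (fun y => !(PySem.Set.contains ks y))) := by
        rw [List.filter_cons]
        simp [hmem]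
      rw [hfilter]
      congr 1
      refine List.map_congr_left ?_
      intro k hk
      by_cases hk0 : k = k0
      · subst hk0
        simp [List.lookup, lookup_eq_none_of_not_mem rest k hde.1, hmem]
      · simp only [List.lookup, beq_eq_false_iff_ne.mpr hk0, if_neg hk0]
    · -- new key: gets appended with a fresh singleton inner dict
      have hstep : entryStep n (PySem.Dict.mk (ks.map (fun k => (k, PySem.Dict.mk (f k))))) (k0, v0)
          = PySem.Dict.mk ((ks ++ [k0]).map (fun k => (k, PySem.Dict.mk
              (if k = k0 then [(PySem.Int.toStr n, v0)] else f k)))) := by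
        rw [entryStep]
        simp only [get?_mk_map, if_neg hmem]
        have hemp : (PySem.Dict.empty : PySem.Dict String String) = PySem.Dict.mk [] := rfl
        have hins : (PySem.Dict.mk (ks.map (fun k => (k, PySem.Dict.mk (f k))))).insert k0 PySem.Dict.empty
            = PySem.Dict.mk ((ks ++ [k0]).map (fun k => (k, PySem.Dict.mk
                (if k = k0 then [] else f k)))) := by
          rw [insert_mk_of_not_mem_fst]
          · congr 1
            simp only [List.map_append, List.map_cons, List.map_nil]
            congr 1
            refine List.map_congr_left ?_
            intro k hk
            have : k ≠ k0 := fun h => hmem (h ▸ hk)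
            simp [this]
          · simp only [List.map_map, Function.comp_def, List.map_id']
            simpa using hmem
        rw [hins, PySem.Dict.modify, PySem.Dict.getD_eq_get?_getD, get?_mk_map,
          if_pos (by simp : k0 ∈ ks ++ [k0]), Option.getD_some,
          insert_mk_map_of_mem _ _ _ _ (by simp : k0 ∈ ks ++ [k0])]
        congr 1
        refine List.map_congr_left ?_
        intro k _
        by_cases hk : k = k0
        · subst hk
          simp [insert_mk_of_not_mem_fst ([] : List (String × String)) _ v0 (by simp)]
        · simp [hk]
      rw [hstep, ih (ks ++ [k0]) _ ?nd ?rest ?cond]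
      case nd =>
        simp only [List.nodup_append, List.nodup_cons]
        refine ⟨hnd, by simp, ?_⟩
        intro a ha b hb
        simp only [List.mem_singleton] at hb
        subst hb
        exact fun h => hmem (by rwa [h] at ha)
      case rest => exact hde.2
      case cond =>
        intro k hk hks
        have hne : k ≠ k0 := fun h => hde.1 (h ▸ hk)
        rw [List.mem_append] at hks
        have hks' : k ∈ ks := by
          rcases hks with h | h
          · exact h
          · simp at h; exact absurd h hne
        simpa [if_neg hne] using h3 k (List.mem_cons_of_mem _ hk) hks'
      have hfilter : (rest.map Prod.fst).filter (fun y => !(PySem.Set.contains (ks ++ [k0]) y)) =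
          (rest.map Prod.fst).filter (fun y => !(PySem.Set.contains ks y)) := by
        refine List.filter_congr ?_
        intro k hk
        have hne : k ≠ k0 := fun h => hde.1 (h ▸ hk)
        simp [PySem.Set.contains_eq_listContains, hne]
      have hfilter2 : (k0 :: rest.map Prod.fst).filter (fun y => !(PySem.Set.contains ks y)) =
          k0 :: (rest.map Prod.fst).filter (fun y => !(PySem.Set.contains ks y)) := by
        rw [List.filter_cons]
        have : (PySem.Set.contains ks k0) = false := by
          rw [PySem.Set.contains_eq_listContains]
          simpa using hmem
        simp [hmem]
      simp only [List.map_cons]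
      rw [hfilter, hfilter2]
      have hlist : ks ++ [k0] ++ (rest.map Prod.fst).filter (fun y => !(PySem.Set.contains ks y)) =
          ks ++ (k0 :: (rest.map Prod.fst).filter (fun y => !(PySem.Set.contains ks y))) := by
        simp
      rw [hlist]
      congr 1
      refine List.map_congr_left ?_
      intro k hk
      by_cases hk0 : k = k0
      · subst hk0
        simp [List.lookup, lookup_eq_none_of_not_mem rest k hde.1, hmem]
      · have hmem' : (k ∈ ks ++ [k0]) ↔ (k ∈ ks) := by simp [hk0]
        simp only [List.lookup, beq_eq_false_iff_ne.mpr hk0, if_neg hk0, hmem']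

lemma mem_keysOf (data : List (List (String × String))) (k : String) :
    k ∈ keysOf data ↔ ∃ e ∈ data, k ∈ e.map Prod.fst := by
  simp [keysOf, List.mem_flatMap]

lemma innerOf_eq_nil (data : List (List (String × String))) (k : String)
    (h : k ∉ keysOf data) : innerOf data k = [] := by
  rw [innerOf, List.filterMap_eq_nil_iff]
  intro pe hpe
  rw [PySem.List.mem_enumerate_iff] at hpe
  obtain ⟨i, hi, rfl⟩ := hpe
  have : k ∉ (data[i]).map Prod.fst := by
    intro hk
    exact h ((mem_keysOf data k).2 ⟨data[i], List.getElem_mem hi, hk⟩)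
  simp [lookup_eq_none_of_not_mem _ _ this]

lemma innerOf_ne_nil (data : List (List (String × String))) (k : String)
    (h : k ∈ keysOf data) : innerOf data k ≠ [] := by
  rw [mem_keysOf] at h
  obtain ⟨e, he, hk⟩ := h
  obtain ⟨i, hi, rfl⟩ := List.getElem_of_mem he
  intro hnil
  rw [innerOf, List.filterMap_eq_nil_iff] at hnil
  have hmem : ((0 + (i : Int)), data[i]) ∈ PySem.List.enumerate data := by
    rw [PySem.List.mem_enumerate_iff]
    exact ⟨i, hi, rfl⟩
  have := hnil _ hmem
  simp only [Option.map_eq_none_iff] at this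
  rcases List.mem_map.1 hk with ⟨p, hp, rfl⟩
  exact lookup_ne_none_of_mem_fst _ _ hk this

lemma toStr_len_not_mem_innerOf (data : List (List (String × String))) (k : String) :
    PySem.Int.toStr (data.length : Int) ∉ (innerOf data k).map Prod.fst := by
  intro hmem
  rw [innerOf] at hmem
  rcases List.mem_map.1 hmem with ⟨q, hq, hfst⟩
  rcases List.mem_filterMap.1 hq with ⟨pe, hpe, hmap⟩
  rcases Option.map_eq_some_iff.1 hmap with ⟨v, _, rfl⟩
  rw [PySem.List.mem_enumerate_iff] at hpe
  obtain ⟨i, hi, rfl⟩ := hpe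
  simp only [] at hfst
  have := toStr_inj_nonneg _ _ (by positivity) (by omega) hfst
  omega

lemma innerOf_append (data : List (List (String × String))) (e : List (String × String)) (k : String) :
    innerOf (data ++ [e]) k =
      innerOf data k ++
        ((List.lookup k e).map (fun v => [(PySem.Int.toStr (data.length : Int), v)])).getD [] := by
  rw [innerOf, innerOf, PySem.List.enumerate_append, List.filterMap_append]
  congr 1
  simp only [PySem.List.enumerate_cons, PySem.List.enumerate_nil, List.filterMap]
  cases List.lookup k e <;> simp

lemma keysOf_append (data : List (List (String × String))) (e : List (String × String))
    (he : (e.map Prod.fst).Nodup) :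
    keysOf (data ++ [e]) =
      keysOf data ++ (e.map Prod.fst).filter (fun y => !(PySem.Set.contains (keysOf data) y)) := by
  rw [keysOf, keysOf, List.flatMap_append, PySem.List.dedup_eq_ofList, PySem.List.dedup_eq_ofList,
    PySem.Set.ofList_append, PySem.Set.update_eq_append_filter]
  simp only [List.flatMap_cons, List.flatMap_nil, List.append_nil,
    PySem.Set.ofList_eq_self_of_nodup _ he]

lemma record_eq (data : List (List (String × String))) (hpre : Pre_group_keys data) :
    (PySem.List.enumerate data).foldl (fun r pe => pe.2.foldl (entryStep pe.1) r) PySem.Dict.empty =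
      PySem.Dict.mk ((keysOf data).map (fun k => (k, PySem.Dict.mk (innerOf data k)))) := by
  induction data using List.reverseRecOn with
  | nil => rfl
  | append_singleton data e ih =>
    have hpre' : Pre_group_keys data := fun x hx => hpre x (List.mem_append_left _ hx)
    have he : (e.map Prod.fst).Nodup := hpre e (by simp)
    rw [PySem.List.enumerate_append, List.foldl_append, ih hpre']
    simp only [PySem.List.enumerate_cons, PySem.List.enumerate_nil, List.foldl_cons, List.foldl_nil]
    have hfold := foldEntry ((0 : Int) + data.length) e (keysOf data) (innerOf data)
      (by rw [keysOf]; exact PySem.List.nodup_dedup _) he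
      (fun k _ hk => ⟨innerOf_ne_nil data k hk, by simpa using toStr_len_not_mem_innerOf data k⟩)
    simp only [zero_add] at hfold ⊢
    rw [hfold, keysOf_append data e he]
    congr 1
    refine List.map_congr_left ?_
    intro k hk
    rw [List.mem_append] at hk
    congr 2
    rw [innerOf_append]
    rcases hk with hk | hk
    · rw [if_pos hk]
    · have hk' : k ∉ keysOf data := by
        rcases List.mem_filter.1 hk with ⟨_, hdec⟩
        simp only [Bool.not_eq_true', PySem.Set.contains_eq_listContains] at hdec
        simpa using hdec
      rw [if_neg hk', innerOf_eq_nil data k hk']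

-- ===== VERDICT (by name: the statement is the Claim_ definition above) =====
theorem group_keys_spec : Claim_equal_group_keys := by
  intro data _hdom hpre
  show group_keys data = group_keys_alt data
  rw [group_keys_unfold, group_keys_alt_unfold, record_eq data hpre]
  simp [List.map_map, Function.comp_def]
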